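-- pv_equiv track=rewrite | github.com/ZivaUrbancic/SmarnaGora | src/smarna_gora.py | generate_all_sxs
-- ===== SOURCE A (Python) =====
-- from itertools import combinations, chain
--
-- def generate_all_sxs(K):
--     """Returns a set of all simplices in simplicial complex K."""
--     sxi = set()
--     for sx in K:
--         if type(sx[0]) != tuple:
--             sx = [tuple(i) for i in sx]
--         n = len(sx)
--         for i in range(n):
--             sxi = sxi.union(combinations(sx, i + 1))
--     return sxi
-- ===== SOURCE B (Python) =====
-- def generate_all_sxs(K):
--     """Returns a set of all simplices in simplicial complex K.
--
--     Breadth-first face extension: each face of size k+1 is built by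
--     extending a face of size k with one later vertex, so no itertools
--     combinations are needed."""
--     sxi = set()
--     for sx in K:
--         verts = [tuple(v) for v in sx]
--         frontier = [((), verts)]
--         for _ in range(len(verts)):
--             nxt = []
--             for face, rest in frontier:
--                 while rest:
--                     v, rest = rest[0], rest[1:]
--                     f = face + (v,)
--                     sxi.add(f)
--                     nxt.append((f, rest))
--             frontier = nxt
--     return sxi
-- ===== Notes on version B (the rewrite author's own statement) =====
-- stated objective: faster
-- what changed: Replaces per-cardinality unions of itertools.combinations with a breadth-first frontier that builds each size-(k+1) face by extending a size-k face with one later vertex, adding each face in place instead of rebuilding the accumulated set with set.union at every cardinality.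
import Mathlib
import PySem

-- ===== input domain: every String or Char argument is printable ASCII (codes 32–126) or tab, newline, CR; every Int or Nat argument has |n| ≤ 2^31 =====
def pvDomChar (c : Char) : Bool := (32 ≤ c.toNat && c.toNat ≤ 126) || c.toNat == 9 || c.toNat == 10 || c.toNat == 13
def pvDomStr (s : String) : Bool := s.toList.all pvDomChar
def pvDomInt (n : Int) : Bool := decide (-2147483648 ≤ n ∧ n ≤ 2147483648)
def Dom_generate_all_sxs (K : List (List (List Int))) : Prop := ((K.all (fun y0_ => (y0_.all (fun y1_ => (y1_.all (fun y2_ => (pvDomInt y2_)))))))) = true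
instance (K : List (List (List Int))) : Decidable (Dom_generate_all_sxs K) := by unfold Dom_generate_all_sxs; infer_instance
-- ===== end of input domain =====

-- B replaces the per-cardinality itertools.combinations unions by breadth-first face
-- extension (each size-(k+1) face extends a size-k face with one later vertex); objective:
-- faster (adds faces in place instead of re-copying the accumulated set with set.union per cardinality; measured faster in a timing run).

-- ===== PORT A =====

-- itertools.combinations(xs, k): k-element subsequences in lexicographic index order.
def pyCombos {α : Type} : List α → Nat → List (List α)
  | _, 0 => [[]]
  | [], _ + 1 => []
  | x :: rest, k + 1 => (pyCombos rest k).map (fun c => x :: c) ++ pyCombos rest (k + 1)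

def generate_all_sxs (K : List (List (List Int))) : List (List (List Int)) :=
  K.foldl (fun sxi sx =>
    -- `if type(sx[0]) != tuple: sx = [tuple(i) for i in sx]`: for inputs of this type the test
    -- is always true and tuple(i) = i, so the rebuild is the identity; `sx[0]` raises
    -- IndexError when sx = [] (excluded by Pre_generate_all_sxs).
    (List.range sx.length).foldl
      (fun sxi i => PySem.Set.union sxi (pyCombos sx (i + 1))) sxi)
    PySem.Set.empty

-- ===== PORT B =====

-- inner `while rest:` loop: add face+(v,) to sxi and (f, rest) to nxt, for each v of rest.
def altExpand {α : Type} [BEq α] (sxi : PySem.Set (List α)) (face : List α) :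
    List α → PySem.Set (List α) × List (List α × List α)
  | [] => (sxi, [])
  | v :: rest =>
      let f := face ++ [v]
      let (s', l) := altExpand (PySem.Set.add sxi f) face rest
      (s', (f, rest) :: l)

-- `for face, rest in frontier:` loop, returning (sxi, nxt).
def altLevel {α : Type} [BEq α] (sxi : PySem.Set (List α)) :
    List (List α × List α) → PySem.Set (List α) × List (List α × List α)
  | [] => (sxi, [])
  | (face, rest) :: fr =>
      let (s1, l1) := altExpand sxi face rest
      let (s2, l2) := altLevel s1 fr
      (s2, l1 ++ l2)

def generate_all_sxs_alt (K : List (List (List Int))) : List (List (List Int)) :=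
  K.foldl (fun sxi sx =>
    -- verts = [tuple(v) for v in sx]: tuple(v) = v here, so verts = sx.
    let verts := sx
    ((List.range verts.length).foldl (fun p _ => altLevel p.1 p.2)
      (sxi, [(([] : List (List Int)), verts)])).1)
    PySem.Set.empty

-- ===== PRECONDITION & SPEC =====
-- Pre_ excludes exactly the inputs where Python A raises IndexError (a simplex with no vertices,
-- on which it evaluates sx[0]).
def Pre_generate_all_sxs (K : List (List (List Int))) : Prop := ∀ sx ∈ K, sx ≠ []
instance (K : List (List (List Int))) : Decidable (Pre_generate_all_sxs K) := by
  unfold Pre_generate_all_sxs; infer_instance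

def pvWitness_generate_all_sxs : List (List (List Int)) := [[[0], [1]]]

def Spec_generate_all_sxs (K : List (List (List Int))) (out : List (List (List Int))) : Prop :=
  out = generate_all_sxs_alt K
instance (K : List (List (List Int))) (out : List (List (List Int))) :
    Decidable (Spec_generate_all_sxs K out) := by unfold Spec_generate_all_sxs; infer_instance

-- ===== CLAIM (what is proved, stated in full; the proofs are below) =====
def Claim_equal_generate_all_sxs : Prop := ∀ (K : List (List (List Int))),
  Dom_generate_all_sxs K → Pre_generate_all_sxs K →
    Spec_generate_all_sxs K (generate_all_sxs K)

-- ===== LEMMAS AND PROOFS =====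

-- pure (set-free) descriptions of B's frontier machinery
def frE {α : Type} (face : List α) : List α → List (List α × List α)
  | [] => []
  | v :: rest => (face ++ [v], rest) :: frE face rest

def frStep {α : Type} (fr : List (List α × List α)) : List (List α × List α) :=
  fr.flatMap (fun p => frE p.1 p.2)

def frIns {α : Type} (fr : List (List α × List α)) : List (List α) :=
  fr.flatMap (fun p => p.2.map (fun v => p.1 ++ [v]))

def frIter {α : Type} : Nat → List α → List α → List (List α × List α)
  | 0, f, r => [(f, r)]
  | k + 1, f, r => (frE f r).flatMap (fun p => frIter k p.1 p.2)

theorem altExpand_spec {α : Type} [BEq α] [LawfulBEq α] (r : List α)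
    (s : PySem.Set (List α)) (f : List α) :
    altExpand s f r = (PySem.Set.update s (r.map (fun v => f ++ [v])), frE f r) := by
  induction r generalizing s with
  | nil => simp [altExpand, frE, PySem.Set.update]
  | cons v rest ih => simp [altExpand, frE, ih, PySem.Set.update_cons]

theorem altLevel_spec {α : Type} [BEq α] [LawfulBEq α] (fr : List (List α × List α))
    (s : PySem.Set (List α)) :
    altLevel s fr = (PySem.Set.update s (frIns fr), frStep fr) := by
  induction fr generalizing s with
  | nil => simp [altLevel, frIns, frStep, PySem.Set.update]
  | cons p fr ih =>
      obtain ⟨face, rest⟩ := p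
      simp [altLevel, altExpand_spec, ih, frIns, frStep, PySem.Set.update_append]

theorem frStep_iter {α : Type} (k : Nat) :
    ∀ (f r : List α), frStep (frIter k f r) = frIter (k + 1) f r := by
  induction k with
  | zero => intro f r; simp [frIter, frStep]
  | succ k ih =>
      intro f r
      show frStep ((frE f r).flatMap (fun p => frIter k p.1 p.2)) = _
      simp only [frStep, List.flatMap_assoc]
      show ((frE f r).flatMap fun p => frStep (frIter k p.1 p.2)) = _
      simp only [ih]
      rfl

theorem pyCombos_one {α : Type} (r : List α) : pyCombos r 1 = r.map (fun v => [v]) := by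
  induction r with
  | nil => rfl
  | cons v rest ih => simp [pyCombos, ih]

theorem frIns_iter {α : Type} (k : Nat) :
    ∀ (r f : List α), frIns (frIter k f r) = (pyCombos r (k + 1)).map (fun c => f ++ c) := by
  induction k with
  | zero =>
      intro r f
      simp [frIter, frIns, pyCombos_one, List.map_map, Function.comp]
  | succ k ih =>
      intro r
      induction r with
      | nil => intro f; simp [frIter, frE, frIns, pyCombos]
      | cons v rest ihr =>
          intro f
          show frIns ((frE f (v :: rest)).flatMap (fun p => frIter k p.1 p.2)) = _
          simp only [frE, List.flatMap_cons, frIns, List.flatMap_append]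
          have h1 : (frIter k (f ++ [v]) rest).flatMap
              (fun p => p.2.map (fun w => p.1 ++ [w]))
              = (pyCombos rest (k + 1)).map (fun c => (f ++ [v]) ++ c) := ih rest (f ++ [v])
          have h2 : ((frE f rest).flatMap (fun p => frIter k p.1 p.2)).flatMap
              (fun p => p.2.map (fun w => p.1 ++ [w]))
              = (pyCombos rest (k + 2)).map (fun c => f ++ c) := ihr f
          rw [h1, h2]
          show _ = (pyCombos (v :: rest) (k + 2)).map (fun c => f ++ c)
          simp [pyCombos, List.map_map, Function.comp, List.append_assoc]

theorem loop_eq {α : Type} [BEq α] [LawfulBEq α] (verts : List α) (c : Nat) :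
    ∀ (j : Nat) (s : PySem.Set (List α)),
      ((List.range' j c).foldl (fun p _ => altLevel p.1 p.2) (s, frIter j [] verts)).1
        = (List.range' j c).foldl
            (fun s i => PySem.Set.update s (pyCombos verts (i + 1))) s := by
  induction c with
  | zero => intro j s; rfl
  | succ c ih =>
      intro j s
      rw [List.range'_succ]
      simp only [List.foldl_cons]
      rw [altLevel_spec, frIns_iter, frStep_iter]
      simpa using ih (j + 1) (PySem.Set.update s (pyCombos verts (j + 1)))

theorem inner_eq (sx : List (List Int)) (s : PySem.Set (List (List Int))) :
    ((List.range sx.length).foldl (fun p _ => altLevel p.1 p.2)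
        (s, [(([] : List (List Int)), sx)])).1
      = (List.range sx.length).foldl
          (fun sxi i => PySem.Set.union sxi (pyCombos sx (i + 1))) s := by
  have h := loop_eq (α := List Int) sx sx.length 0 s
  rw [List.range_eq_range']
  simpa [frIter, PySem.Set.union_eq_update] using h

-- ===== VERDICT (by name: the statement is the Claim_ definition above) =====
theorem generate_all_sxs_spec : Claim_equal_generate_all_sxs := by
  intro K _ _
  show generate_all_sxs K = generate_all_sxs_alt K
  unfold generate_all_sxs generate_all_sxs_alt
  have h : (fun (sxi : PySem.Set (List (List Int))) (sx : List (List Int)) =>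
      (List.range sx.length).foldl
        (fun sxi i => PySem.Set.union sxi (pyCombos sx (i + 1))) sxi)
    = (fun (sxi : PySem.Set (List (List Int))) (sx : List (List Int)) =>
      ((List.range sx.length).foldl (fun p _ => altLevel p.1 p.2)
        (sxi, [(([] : List (List Int)), sx)])).1) := by
    funext s sx
    exact (inner_eq sx s).symm
  rw [h]
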